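-- pv_equiv track=rewrite | github.com/qmanhbeo/SDG-Lens | SDG_Lens/plot_results.py | clean_display_text
-- ===== SOURCE A (Python) =====
-- import unicodedata
-- from typing import Any
--
-- def clean_display_text(text: Any) -> str:
--     cleaned = []
--     for char in str(text):
--         if char in "\n\t":
--             cleaned.append(" ")
--         elif unicodedata.category(char).startswith("C"):
--             cleaned.append(" ")
--         else:
--             cleaned.append(char)
--     return " ".join("".join(cleaned).split())
-- ===== SOURCE B (Python) =====
-- import unicodedata
--
--
-- def clean_display_text(text) -> str:
--     # Single streaming pass: clean each char and split into words on the fly.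
--     words = []
--     buf = []
--     for char in str(text):
--         if char in "\n\t" or unicodedata.category(char).startswith("C"):
--             cleaned = " "
--         else:
--             cleaned = char
--         if cleaned.isspace():
--             if buf:
--                 words.append("".join(buf))
--                 buf = []
--         else:
--             buf.append(cleaned)
--     if buf:
--         words.append("".join(buf))
--     return " ".join(words)
-- ===== Notes on version B (the rewrite author's own statement) =====
-- stated objective: alternative
-- what changed: Replaces A's build-a-cleaned-copy-then-str.split-then-join pipeline by a single streaming pass that cleans each character and maintains a current-word buffer plus completed-word list, joining once at the end.
import Mathlib
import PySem

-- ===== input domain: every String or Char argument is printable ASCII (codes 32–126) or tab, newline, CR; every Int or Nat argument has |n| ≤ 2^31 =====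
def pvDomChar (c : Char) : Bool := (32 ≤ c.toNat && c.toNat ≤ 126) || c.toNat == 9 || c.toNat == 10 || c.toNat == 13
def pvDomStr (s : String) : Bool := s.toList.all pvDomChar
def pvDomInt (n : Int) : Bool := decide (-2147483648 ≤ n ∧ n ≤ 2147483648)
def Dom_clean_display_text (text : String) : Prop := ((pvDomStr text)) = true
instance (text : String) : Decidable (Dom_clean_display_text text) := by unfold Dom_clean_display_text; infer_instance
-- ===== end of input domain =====

-- B replaces A's clean-copy → str.split → join pipeline by one streaming pass with a word buffer (alternative decomposition, same cost).


-- ===== PORT A =====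
-- unicodedata.category(char).startswith("C"): exact on the ASCII domain (plus tab/newline/CR),
-- where category-C characters are exactly the codes < 32 and 127.
def aCatC (c : Char) : Bool := c.toNat < 32 || c.toNat == 127

-- per-iteration body of A's loop: the value appended to `cleaned` for one char
def aCleanChar (c : Char) : Char :=
  if c = '\n' ∨ c = '\t' then ' '
  else if aCatC c then ' '
  else c

-- A: build the cleaned list char by char, then " ".join(cleaned.split())
def clean_display_text (text : String) : String :=
  let cleaned := text.toList.map aCleanChar
  String.ofList (PySem.Chars.join [' '] (PySem.Chars.split₀ cleaned))

-- ===== PORT B =====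
def bCatC (c : Char) : Bool := c.toNat < 32 || c.toNat == 127

-- streaming loop of Source B: `buf` is the current word, `words` the completed words
def bGo : List Char → List Char → List (List Char) → List (List Char)
  | [], buf, words => if buf = [] then words else words ++ [buf]
  | c :: rest, buf, words =>
    let cleaned := if c = '\n' ∨ c = '\t' then ' ' else if bCatC c then ' ' else c
    if PySem.Chars.isspace cleaned then
      if buf = [] then bGo rest [] words else bGo rest [] (words ++ [buf])
    else bGo rest (buf ++ [cleaned]) words

def clean_display_text_alt (text : String) : String :=
  String.ofList (PySem.Chars.join [' '] (bGo text.toList [] []))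

-- ===== PRECONDITION & SPEC =====
def Spec_clean_display_text (text : String) (out : String) : Prop := out = clean_display_text_alt text
instance (text : String) (out : String) : Decidable (Spec_clean_display_text text out) := by unfold Spec_clean_display_text; infer_instance

-- ===== CLAIM (what is proved, stated in full; the proofs are below) =====
def Claim_equal_clean_display_text : Prop := ∀ (text : String), Dom_clean_display_text text → Spec_clean_display_text text (clean_display_text text)

-- ===== LEMMAS AND PROOFS =====

-- B's streaming loop computes exactly split₀'s scan over the cleaned list,
-- with `buf`/`words` being split₀.go's accumulators reversed.
theorem bGo_eq_split₀_go (cs : List Char) :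
    ∀ (buf : List Char) (words : List (List Char)),
      PySem.Chars.split₀.go (cs.map aCleanChar) buf.reverse words.reverse =
        bGo cs buf words := by
  induction cs with
  | nil =>
    intro buf words
    simp only [List.map_nil, PySem.Chars.split₀.go, bGo, List.isEmpty_iff, List.reverse_eq_nil_iff]
    split_ifs with h
    · simp
    · simp
  | cons c rest ih =>
    intro buf words
    have hclean : (if c = '\n' ∨ c = '\t' then ' ' else if bCatC c then ' ' else c) = aCleanChar c := by
      simp [aCleanChar, aCatC, bCatC]
    simp only [List.map_cons, PySem.Chars.split₀.go, bGo, hclean, List.isEmpty_iff,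
      List.reverse_eq_nil_iff]
    by_cases hsp : PySem.Chars.isspace (aCleanChar c) = true
    · rw [if_pos hsp, if_pos hsp]
      by_cases hb : buf = []
      · rw [if_pos hb, if_pos hb, show ([] : List Char) = ([] : List Char).reverse from rfl]
        exact ih [] words
      · rw [if_neg hb, if_neg hb,
          show buf.reverse.reverse :: words.reverse = (words ++ [buf]).reverse from by simp,
          show ([] : List Char) = ([] : List Char).reverse from rfl]
        exact ih [] (words ++ [buf])
    · rw [if_neg hsp, if_neg hsp,
        show aCleanChar c :: buf.reverse = (buf ++ [aCleanChar c]).reverse from by simp]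
      exact ih (buf ++ [aCleanChar c]) words

-- ===== VERDICT (by name: the statement is the Claim_ definition above) =====
theorem clean_display_text_spec : Claim_equal_clean_display_text := by
  intro text _
  show _ = _
  simp only [clean_display_text, clean_display_text_alt]
  rw [show PySem.Chars.split₀ (text.toList.map aCleanChar) =
        bGo text.toList [] [] from by
      simpa [PySem.Chars.split₀] using bGo_eq_split₀_go text.toList [] []]
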